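-- pv_equiv track=rewrite | github.com/Jatygu/mirror | Mirror.py | categorize_titles
-- ===== SOURCE A (Python) =====
-- from collections import Counter, defaultdict
--
-- def categorize_titles(titles):
--     categories = defaultdict(list)
--     for i, title in enumerate(titles):
--         t = title.lower()
--         if "music" in t or "song" in t or "isrc" in t:
--             categories["Music & Licensing"].append((i, title))
--         elif "job" in t or "resume" in t or "application" in t:
--             categories["Career & Jobs"].append((i, title))
--         elif "ai" in t or "script" in t or "automation" in t:
--             categories["Automation & AI"].append((i, title))
--         elif "gratitude" in t or "appreciation" in t or "affirmation" in t:
--             categories["Inner Alignment"].append((i, title))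
--         elif "art" in t or "image" in t or "creative" in t:
--             categories["Creative Flow"].append((i, title))
--         else:
--             categories["Other"].append((i, title))
--     return dict(sorted(categories.items(), key=lambda item: len(item[1]), reverse=True))
-- ===== SOURCE B (Python) =====
-- CATS = [
--     ("Music & Licensing", ["music", "song", "isrc"]),
--     ("Career & Jobs", ["job", "resume", "application"]),
--     ("Automation & AI", ["ai", "script", "automation"]),
--     ("Inner Alignment", ["gratitude", "appreciation", "affirmation"]),
--     ("Creative Flow", ["art", "image", "creative"]),
-- ]
--
--
-- def _category(title):
--     t = title.lower()
--     for name, kws in CATS: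
--         if any(k in t for k in kws):
--             return name
--     return "Other"
--
--
-- def categorize_titles(titles):
--     order = list(dict.fromkeys(_category(title) for title in titles))
--     categories = {
--         name: [(i, title) for i, title in enumerate(titles) if _category(title) == name]
--         for name in order
--     }
--     return dict(sorted(categories.items(), key=lambda item: len(item[1]), reverse=True))
-- ===== Notes on version B (the rewrite author's own statement) =====
-- stated objective: idiomatic
-- what changed: Replaces the six-way elif chain mutating a defaultdict in one pass with a keyword-table classifier function plus dict.fromkeys for first-seen category order and a per-category list comprehension building each bucket.
import Mathlib
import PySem

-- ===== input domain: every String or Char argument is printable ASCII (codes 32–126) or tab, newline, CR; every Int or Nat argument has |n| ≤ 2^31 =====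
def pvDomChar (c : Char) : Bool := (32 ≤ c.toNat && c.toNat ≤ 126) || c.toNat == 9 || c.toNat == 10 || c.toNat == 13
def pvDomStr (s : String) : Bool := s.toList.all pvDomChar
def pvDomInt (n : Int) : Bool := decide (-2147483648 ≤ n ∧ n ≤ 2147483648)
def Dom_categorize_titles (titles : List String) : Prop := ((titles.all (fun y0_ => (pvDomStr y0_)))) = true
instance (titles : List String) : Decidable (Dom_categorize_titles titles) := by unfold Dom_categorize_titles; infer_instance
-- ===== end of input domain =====

-- B re-implements A with a classifier function over a keyword table plus per-category
-- comprehensions (idiomatic decomposition); same results, no speed claim.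

-- ===== PORT A =====
-- one step of A's loop body: the elif chain appending into the defaultdict
def pvStepA (d : PySem.Dict String (List (Int × String))) (p : Int × String)
    : PySem.Dict String (List (Int × String)) :=
  let t := PySem.Str.lower p.2
  if PySem.Str.isIn "music" t || PySem.Str.isIn "song" t || PySem.Str.isIn "isrc" t then
    d.insert "Music & Licensing" (d.getD "Music & Licensing" [] ++ [p])
  else if PySem.Str.isIn "job" t || PySem.Str.isIn "resume" t || PySem.Str.isIn "application" t then
    d.insert "Career & Jobs" (d.getD "Career & Jobs" [] ++ [p])
  else if PySem.Str.isIn "ai" t || PySem.Str.isIn "script" t || PySem.Str.isIn "automation" t then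
    d.insert "Automation & AI" (d.getD "Automation & AI" [] ++ [p])
  else if PySem.Str.isIn "gratitude" t || PySem.Str.isIn "appreciation" t || PySem.Str.isIn "affirmation" t then
    d.insert "Inner Alignment" (d.getD "Inner Alignment" [] ++ [p])
  else if PySem.Str.isIn "art" t || PySem.Str.isIn "image" t || PySem.Str.isIn "creative" t then
    d.insert "Creative Flow" (d.getD "Creative Flow" [] ++ [p])
  else
    d.insert "Other" (d.getD "Other" [] ++ [p])

def categorize_titles (titles : List String) : List (String × List (Int × String)) :=
  let categories := (PySem.List.enumerate titles).foldl pvStepA PySem.Dict.empty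
  PySem.List.sorted categories.items (fun item => item.2.length) (reverse := true)

-- ===== PORT B =====
def pvCATS : List (String × List String) :=
  [("Music & Licensing", ["music", "song", "isrc"]),
   ("Career & Jobs", ["job", "resume", "application"]),
   ("Automation & AI", ["ai", "script", "automation"]),
   ("Inner Alignment", ["gratitude", "appreciation", "affirmation"]),
   ("Creative Flow", ["art", "image", "creative"])]

-- _category: first table row whose keyword list matches, else "Other" (early return = foldr)
def pvCategory (title : String) : String :=
  let t := PySem.Str.lower title
  pvCATS.foldr (fun nk acc => if nk.2.any (fun k => PySem.Str.isIn k t) then nk.1 else acc) "Other"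

def categorize_titles_alt (titles : List String) : List (String × List (Int × String)) :=
  let order := PySem.List.dedup (titles.map pvCategory)
  let categories := order.map (fun name =>
    (name, (PySem.List.enumerate titles).filter (fun p => pvCategory p.2 == name)))
  PySem.List.sorted categories (fun item => item.2.length) (reverse := true)

-- ===== PRECONDITION & SPEC =====
def Spec_categorize_titles (titles : List String) (out : List (String × List (Int × String))) : Prop := out = categorize_titles_alt titles
instance (titles : List String) (out : List (String × List (Int × String))) : Decidable (Spec_categorize_titles titles out) := by unfold Spec_categorize_titles; infer_instance

-- ===== CLAIM (what is proved, stated in full; the proofs are below) =====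
def Claim_equal_categorize_titles : Prop := ∀ (titles : List String), Dom_categorize_titles titles → Spec_categorize_titles titles (categorize_titles titles)

-- ===== LEMMAS AND PROOFS =====

-- A's elif chain picks exactly the category pvCategory computes
theorem pvStepA_eq (d : PySem.Dict String (List (Int × String))) (p : Int × String) :
    pvStepA d p = d.insert (pvCategory p.2) (d.getD (pvCategory p.2) [] ++ [p]) := by
  simp only [pvStepA, pvCategory, pvCATS, List.foldr, List.any, Bool.or_false, Bool.or_assoc]
  split_ifs <;> rfl

-- the bucket map built over a prefix l
def pvBuckets (l : List (Int × String)) : List (String × List (Int × String)) :=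
  (PySem.List.dedup (l.map (fun p => pvCategory p.2))).map
    (fun name => (name, l.filter (fun p => pvCategory p.2 == name)))

-- dict.fromkeys of xs + [y]
theorem pvDedup_snoc {a : Type} [DecidableEq a] (ys : List a) (y : a) :
    PySem.List.dedup (ys ++ [y])
      = if y ∈ ys then PySem.List.dedup ys else PySem.List.dedup ys ++ [y] := by
  simp only [PySem.List.dedup_eq_ofList, PySem.Set.ofList_eq_foldl, List.foldl_append,
    List.foldl_cons, List.foldl_nil]
  rw [← PySem.Set.ofList_eq_foldl]
  unfold PySem.Set.add
  by_cases h : y ∈ ys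
  · rw [if_pos h, if_pos]
    rw [PySem.Set.contains_iff, PySem.Set.mem_ofList]; exact h
  · rw [if_neg h, if_neg]
    rw [PySem.Set.contains_iff, PySem.Set.mem_ofList]; exact h

theorem pvFold_items (l : List (Int × String)) :
    ((l.foldl pvStepA PySem.Dict.empty).items) = pvBuckets l := by
  induction l using List.reverseRecOn with
  | nil => rfl
  | append_singleton l x ih =>
    rw [List.foldl_append, List.foldl_cons, List.foldl_nil, pvStepA_eq]
    have hkeys : (l.foldl pvStepA PySem.Dict.empty).keys
        = PySem.List.dedup (l.map (fun p => pvCategory p.2)) := by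
      simp only [PySem.Dict.keys, ih, pvBuckets, List.map_map]
      exact List.map_id _
    by_cases hmem : pvCategory x.2 ∈ l.map (fun p => pvCategory p.2)
    · have hc : (l.foldl pvStepA PySem.Dict.empty).contains (pvCategory x.2) = true := by
        rw [PySem.Dict.contains_eq_decide_mem_keys, hkeys]
        simp [hmem]
      have hnodup : (l.foldl pvStepA PySem.Dict.empty).keys.Nodup := by
        rw [hkeys]; exact PySem.List.nodup_dedup _
      have hmemitems : (pvCategory x.2, l.filter (fun p => pvCategory p.2 == pvCategory x.2))
          ∈ (l.foldl pvStepA PySem.Dict.empty).items := by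
        rw [ih]; unfold pvBuckets
        exact List.mem_map.mpr ⟨pvCategory x.2, (PySem.List.mem_dedup _ _).mpr hmem, rfl⟩
      have hgetD : (l.foldl pvStepA PySem.Dict.empty).getD (pvCategory x.2) []
          = l.filter (fun p => pvCategory p.2 == pvCategory x.2) := by
        rw [PySem.Dict.getD_eq_get?_getD, PySem.Dict.get?_of_mem_items _ hmemitems hnodup]; rfl
      rw [PySem.Dict.items_insert_of_contains _ _ hc, ih, hgetD]
      unfold pvBuckets
      simp only [List.map_append, List.map_cons, List.map_nil]
      rw [pvDedup_snoc, if_pos hmem, List.map_map]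
      apply List.map_congr_left
      intro name _
      simp only [Function.comp_apply, List.filter_append, List.filter_cons, List.filter_nil]
      by_cases hn : name = pvCategory x.2
      · subst hn; simp
      · have h1 : (name == pvCategory x.2) = false := by simpa using hn
        have h2 : (pvCategory x.2 == name) = false := by simpa using (Ne.symm hn)
        simp [h1, h2]
    · have hc : (l.foldl pvStepA PySem.Dict.empty).contains (pvCategory x.2) = false := by
        rw [PySem.Dict.contains_eq_decide_mem_keys, hkeys]
        simp [hmem]
      have hgetD : (l.foldl pvStepA PySem.Dict.empty).getD (pvCategory x.2) [] = [] :=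
        PySem.Dict.getD_of_not_contains _ _ hc
      rw [PySem.Dict.items_insert_of_not_contains _ _ hc, ih, hgetD]
      unfold pvBuckets
      simp only [List.map_append, List.map_cons, List.map_nil]
      rw [pvDedup_snoc, if_neg hmem, List.map_append]
      congr 1
      · apply List.map_congr_left
        intro name hname
        have hne : name ≠ pvCategory x.2 := by
          intro h; exact hmem (h ▸ (PySem.List.mem_dedup _ _).mp hname)
        have h2 : (pvCategory x.2 == name) = false := by simpa using (Ne.symm hne)
        simp [List.filter_append, h2]
      · have hfil : l.filter (fun p => pvCategory p.2 == pvCategory x.2) = [] := by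
          rw [List.filter_eq_nil_iff]
          intro p hp hbeq
          exact hmem (List.mem_map.mpr ⟨p, hp, by simpa using hbeq⟩)
        simp [List.filter_append, hfil]

theorem categorize_titles_spec' (titles : List String) :
    categorize_titles titles = categorize_titles_alt titles := by
  have he : (PySem.List.enumerate titles).map (fun p => pvCategory p.2) = titles.map pvCategory := by
    conv_rhs => rw [← PySem.List.map_snd_enumerate (xs := titles) (s := 0)]
    rw [List.map_map]; rfl
  unfold categorize_titles categorize_titles_alt
  simp only [pvFold_items, pvBuckets, he]

-- ===== VERDICT (by name: the statement is the Claim_ definition above) =====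
theorem categorize_titles_spec : Claim_equal_categorize_titles := by
  intro titles _
  unfold Spec_categorize_titles
  exact categorize_titles_spec' titles
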